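-- pv_equiv track=rewrite | github.com/Yadrick/string_homework_for_students | 3_maximum_number_of_words/main.py | get_max_number_of_words_from_sentences
-- ===== SOURCE A (Python) =====
-- def get_max_number_of_words_from_sentences(sentences: list[str]) -> int:
--     """Пишите ваш код здесь."""
--
--     count_words = 0
--     for word in sentences:
--         if word.split(' ')[0] == '':
--             count_words = 0
--         elif count_words < len(word.split(' ')):
--             count_words = len(word.split(' '))
--     return count_words
-- ===== SOURCE B (Python) =====
-- def get_max_number_of_words_from_sentences(sentences: list[str]) -> int:
--     # Backward pass with early exit: only the trailing run of sentences after
--     # the last "reset" sentence (first space-split token empty) can matter.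
--     result = 0
--     for word in reversed(sentences):
--         parts = word.split(' ')
--         if parts[0] == '':
--             break
--         result = max(result, len(parts))
--     return result
-- ===== Notes on version B (the rewrite author's own statement) =====
-- stated objective: alternative
-- what changed: Replaces A's forward reset-and-accumulate fold (reset to 0 on a sentence whose first space-split token is empty) by a backward scan that stops at the first such sentence and takes the max word count of the trailing run, also splitting each sentence once instead of up to twice.
import Mathlib
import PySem

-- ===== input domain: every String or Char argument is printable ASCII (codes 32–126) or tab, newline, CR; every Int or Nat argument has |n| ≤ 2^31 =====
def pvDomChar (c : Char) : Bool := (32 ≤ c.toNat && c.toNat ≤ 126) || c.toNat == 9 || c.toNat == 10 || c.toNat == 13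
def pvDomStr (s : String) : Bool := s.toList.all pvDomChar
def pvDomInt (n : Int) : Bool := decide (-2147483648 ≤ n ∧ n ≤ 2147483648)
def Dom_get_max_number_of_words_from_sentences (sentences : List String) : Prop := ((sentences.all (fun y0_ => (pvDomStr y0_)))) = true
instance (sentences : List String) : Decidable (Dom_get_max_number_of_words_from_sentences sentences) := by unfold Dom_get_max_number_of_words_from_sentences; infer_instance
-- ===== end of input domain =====

-- B changes the algorithm (backward scan with early exit over the trailing run,
-- instead of A's forward reset-and-accumulate fold); equal return value is proved.

-- ===== PORT A =====
-- loop body of A: reset to 0 if the first space-split token is empty, else keep the max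
def pvStepA (count_words : Int) (word : String) : Int :=
  let parts := PySem.Chars.splitOn word.toList [' ']
  if PySem.List.pyGet? parts 0 = some [] then 0
  else if count_words < (parts.length : Int) then (parts.length : Int)
  else count_words

def get_max_number_of_words_from_sentences (sentences : List String) : Int :=
  sentences.foldl pvStepA 0

-- ===== PORT B =====
-- B's loop over reversed(sentences) with `break` modelled as early-exit recursion
def pvGoB : List String → Int → Int
  | [], r => r
  | word :: rest, r =>
    let parts := PySem.Chars.splitOn word.toList [' ']
    if PySem.List.pyGet? parts 0 = some [] then r
    else pvGoB rest (max r (parts.length : Int))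

def get_max_number_of_words_from_sentences_alt (sentences : List String) : Int :=
  pvGoB sentences.reverse 0

-- ===== PRECONDITION & SPEC =====
def Spec_get_max_number_of_words_from_sentences (sentences : List String) (out : Int) : Prop := out = get_max_number_of_words_from_sentences_alt sentences
instance (sentences : List String) (out : Int) : Decidable (Spec_get_max_number_of_words_from_sentences sentences out) := by unfold Spec_get_max_number_of_words_from_sentences; infer_instance

-- ===== CLAIM (what is proved, stated in full; the proofs are below) =====
def Claim_equal_get_max_number_of_words_from_sentences : Prop := ∀ (sentences : List String), Dom_get_max_number_of_words_from_sentences sentences → Spec_get_max_number_of_words_from_sentences sentences (get_max_number_of_words_from_sentences sentences)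

-- ===== LEMMAS AND PROOFS =====

theorem pvStepA_eq (a : Int) (w : String) :
    pvStepA a w =
      if PySem.List.pyGet? (PySem.Chars.splitOn w.toList [' ']) 0 = some [] then 0
      else if a < ((PySem.Chars.splitOn w.toList [' ']).length : Int) then ((PySem.Chars.splitOn w.toList [' ']).length : Int)
      else a := rfl

theorem pvGoB_cons (w : String) (t : List String) (r : Int) :
    pvGoB (w :: t) r =
      if PySem.List.pyGet? (PySem.Chars.splitOn w.toList [' ']) 0 = some [] then r
      else pvGoB t (max r ((PySem.Chars.splitOn w.toList [' ']).length : Int)) := rfl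

theorem pvFoldA_nonneg (xs : List String) (a : Int) (h : 0 ≤ a) :
    0 ≤ xs.foldl pvStepA a := by
  induction xs generalizing a with
  | nil => simpa using h
  | cons x t ih =>
    simp only [List.foldl_cons]
    apply ih
    rw [pvStepA_eq]
    split_ifs with h1 h2 <;> [omega; positivity; exact h]

theorem pvGoB_reverse (xs : List String) (r : Int) (hr : 0 ≤ r) :
    pvGoB xs.reverse r = max r (xs.foldl pvStepA 0) := by
  induction xs using List.reverseRecOn generalizing r with
  | nil => simp [pvGoB]; omega
  | append_singleton t x ih =>
    rw [List.reverse_append, List.reverse_singleton, List.singleton_append]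
    rw [pvGoB_cons, List.foldl_append, List.foldl_cons, List.foldl_nil, pvStepA_eq]
    have hF := pvFoldA_nonneg t 0 le_rfl
    split_ifs with h1 h2
    · -- A resets to 0 at x, B stops with r
      omega
    · rw [ih _ (by omega)]; omega
    · rw [ih _ (by omega)]; omega

-- ===== VERDICT (by name: the statement is the Claim_ definition above) =====
theorem get_max_number_of_words_from_sentences_spec : Claim_equal_get_max_number_of_words_from_sentences := by
  intro sentences _
  show _ = _
  unfold get_max_number_of_words_from_sentences_alt
  rw [pvGoB_reverse sentences 0 le_rfl]
  have := pvFoldA_nonneg sentences 0 le_rfl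
  unfold get_max_number_of_words_from_sentences
  omega
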